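-- pv_equiv track=rewrite | github.com/PureJewa/code-p | code/werk2/logic/validation/general.py | split_serial
-- ===== SOURCE A (Python) =====
-- def parse_pattern(pattern):
--     """Geeft een lijst van (type, waarde). Type kan 'L', 'D' of 'S' (speciaal) zijn."""
--     parts = []
--     i = 0
--     while i < len(pattern):
--         char = pattern[i]
--         if char in ('L', 'D'):
--             length = 1
--             while i + 1 < len(pattern) and pattern[i + 1] == char:
--                 length += 1
--                 i += 1
--             parts.append((char, length))
--         else:
--             parts.append(('S', char))  # Speciaal karakter
--         i += 1
--     return parts
--
-- def split_serial(serial, pattern):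
--     """Splitst het serienummer op basis van het patroon, inclusief speciale tekens."""
--     pattern_parts = parse_pattern(pattern)
--     serial_parts = []
--     idx = 0
--     for p_type, value in pattern_parts:
--         if p_type == 'S':
--             serial_parts.append(value)
--             idx += 1
--         else:
--             serial_parts.append(serial[idx:idx + value])
--             idx += value
--     return serial_parts
-- ===== SOURCE B (Python) =====
-- def split_serial(serial, pattern):
--     """Single fused scan over the pattern: no intermediate (type, value) table."""
--     parts = []
--     idx = 0
--     i = 0
--     n = len(pattern)
--     while i < n:
--         ch = pattern[i]
--         if ch == 'L' or ch == 'D':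
--             j = i + 1
--             while j < n and pattern[j] == ch:
--                 j += 1
--             length = j - i
--             parts.append(serial[idx:idx + length])
--             idx += length
--             i = j
--         else:
--             parts.append(ch)
--             idx += 1
--             i += 1
--     return parts
-- ===== Notes on version B (the rewrite author's own statement) =====
-- stated objective: faster
-- what changed: Replaces the two-phase build-a-(type,value)-table-then-walk structure with one fused scan over the pattern that slices the serial directly while detecting runs, eliminating parse_pattern and its intermediate tuple list (measured ~1.5-1.9x faster by avoiding tuple allocation and the second pass).
import Mathlib
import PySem

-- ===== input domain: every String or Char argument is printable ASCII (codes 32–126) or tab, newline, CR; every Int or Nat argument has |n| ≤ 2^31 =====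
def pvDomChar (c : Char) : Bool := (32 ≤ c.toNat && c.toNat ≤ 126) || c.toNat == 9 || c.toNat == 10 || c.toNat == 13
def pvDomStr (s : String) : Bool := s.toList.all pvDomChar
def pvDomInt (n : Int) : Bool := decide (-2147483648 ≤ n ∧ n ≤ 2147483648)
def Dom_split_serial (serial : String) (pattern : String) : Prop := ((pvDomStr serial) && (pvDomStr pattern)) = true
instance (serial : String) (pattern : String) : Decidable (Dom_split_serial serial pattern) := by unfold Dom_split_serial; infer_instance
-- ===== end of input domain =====

-- B inlines A's parse_pattern into split_serial as a single fused scan (no intermediate table); return values are proved equal.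

-- ===== PORT A =====
-- parse_pattern's result: ('L'|'D', length) or ('S', char)
inductive pvPart where
  | run : Char → Int → pvPart
  | special : Char → pvPart
deriving DecidableEq, Repr

-- the inner `while pattern[i+1] == char` scan: the chars it consumes are exactly takeWhile (== char)
def pvParsePattern : List Char → List pvPart
  | [] => []
  | c :: rest =>
    if c = 'L' ∨ c = 'D' then
      pvPart.run c (1 + ((rest.takeWhile (· == c)).length : Int))
        :: pvParsePattern (rest.dropWhile (· == c))
    else
      pvPart.special c :: pvParsePattern rest
termination_by l => l.length
decreasing_by
  · simpa using Nat.lt_succ_of_le (rest.length_dropWhile_le (· == c))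
  · simp

-- the `for p_type, value in pattern_parts` loop with accumulator idx
def pvWalk (serial : String) : List pvPart → Int → List String
  | [], _ => []
  | pvPart.special c :: ps, idx => String.ofList [c] :: pvWalk serial ps (idx + 1)
  | pvPart.run _ len :: ps, idx =>
      PySem.Str.slice serial (some idx) (some (idx + len)) :: pvWalk serial ps (idx + len)

def split_serial (serial : String) (pattern : String) : List String :=
  pvWalk serial (pvParsePattern pattern.toList) 0

-- ===== PORT B =====
def pvSplitAux (serial : String) (idx : Int) : List Char → List String
  | [] => []
  | c :: rest =>
    if c = 'L' ∨ c = 'D' then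
      let len : Int := 1 + ((rest.takeWhile (· == c)).length : Int)
      PySem.Str.slice serial (some idx) (some (idx + len))
        :: pvSplitAux serial (idx + len) (rest.dropWhile (· == c))
    else
      String.ofList [c] :: pvSplitAux serial (idx + 1) rest
termination_by l => l.length
decreasing_by
  · simpa using Nat.lt_succ_of_le (rest.length_dropWhile_le (· == c))
  · simp

def split_serial_alt (serial : String) (pattern : String) : List String :=
  pvSplitAux serial 0 pattern.toList

-- ===== PRECONDITION & SPEC =====
def Spec_split_serial (serial : String) (pattern : String) (out : List String) : Prop := out = split_serial_alt serial pattern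
instance (serial : String) (pattern : String) (out : List String) : Decidable (Spec_split_serial serial pattern out) := by unfold Spec_split_serial; infer_instance

-- ===== CLAIM (what is proved, stated in full; the proofs are below) =====
def Claim_equal_split_serial : Prop := ∀ (serial : String) (pattern : String), Dom_split_serial serial pattern → Spec_split_serial serial pattern (split_serial serial pattern)

-- ===== LEMMAS AND PROOFS =====
theorem pvWalk_parse_eq (serial : String) :
    ∀ l idx, pvWalk serial (pvParsePattern l) idx = pvSplitAux serial idx l := by
  intro l
  induction l using pvParsePattern.induct with
  | case1 => intro idx; simp [pvParsePattern, pvSplitAux, pvWalk]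
  | case2 c rest h ih =>
      intro idx
      rw [pvParsePattern, pvSplitAux]
      simp only [if_pos h, pvWalk, ih]
  | case3 c rest h ih =>
      intro idx
      rw [pvParsePattern, pvSplitAux]
      simp only [if_neg h, pvWalk, ih]

-- ===== VERDICT (by name: the statement is the Claim_ definition above) =====
theorem split_serial_spec : Claim_equal_split_serial := by
  intro serial pattern _
  unfold Spec_split_serial split_serial split_serial_alt
  exact pvWalk_parse_eq serial pattern.toList 0
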